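-- pv_equiv track=rewrite | github.com/kevinnbass/TestMaster | organized_codebase/testing/framework_adapter.py | _adapt_to_java
-- ===== SOURCE A (Python) =====
-- def _adapt_to_java(content: str) -> str:
--     """Adapt Python-like content to Java."""
--
--     # Basic Python to Java adaptations
--     adaptations = {
--         "True": "true",
--         "False": "false",
--         "None": "null",
--         "self.": "this.",
--         "def ": "public ",
--         "__init__": "constructor"
--     }
--
--     adapted = content
--     for python_syntax, java_syntax in adaptations.items():
--         adapted = adapted.replace(python_syntax, java_syntax)
--
--     return adapted
-- ===== SOURCE B (Python) =====
-- def _adapt_to_java(content: str) -> str: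
--     """Adapt Python-like content to Java (single left-to-right pass)."""
--     adaptations = {
--         "True": "true",
--         "False": "false",
--         "None": "null",
--         "self.": "this.",
--         "def ": "public ",
--         "__init__": "constructor"
--     }
--     out = []
--     i = 0
--     n = len(content)
--     while i < n:
--         for py, java in adaptations.items():
--             if content.startswith(py, i):
--                 out.append(java)
--                 i += len(py)
--                 break
--         else:
--             out.append(content[i])
--             i += 1
--     return "".join(out)
-- ===== Notes on version B (the rewrite author's own statement) =====
-- stated objective: alternative
-- what changed: Replaced A's six sequential full-string str.replace passes by a single left-to-right scan that tries the six Python tokens at each position, emits the Java text and skips the token on a match; Pre_ excludes inputs containing "Falself.", where the overlapping tokens "False" and "self." make the sequential and the single-pass result defensibly differ.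
-- outside the precondition, e.g. on _adapt_to_java('Falself.'): A returns 'falthis.', B returns 'falself.'
import Mathlib
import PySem

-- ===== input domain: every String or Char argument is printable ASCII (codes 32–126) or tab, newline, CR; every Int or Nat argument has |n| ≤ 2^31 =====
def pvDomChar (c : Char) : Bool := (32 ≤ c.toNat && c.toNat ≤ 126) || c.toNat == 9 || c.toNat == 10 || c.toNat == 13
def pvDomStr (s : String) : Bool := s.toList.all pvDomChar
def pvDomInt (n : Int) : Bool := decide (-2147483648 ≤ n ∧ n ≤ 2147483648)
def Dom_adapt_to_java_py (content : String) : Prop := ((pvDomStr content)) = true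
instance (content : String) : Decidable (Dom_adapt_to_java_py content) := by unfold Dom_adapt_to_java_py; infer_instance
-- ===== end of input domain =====

set_option maxRecDepth 8192


-- B replaces A's six sequential full-string replacement passes by ONE left-to-right scan that tries
-- the six tokens at each position (objective: alternative single-pass algorithm); inputs whose
-- overlapping tokens make the two defensibly differ are excluded by Pre_ below.

-- ===== PORT A =====
-- A: fold the six (python, java) pairs over the string, one str.replace pass per pair.
def adapt_to_java_py (content : String) : String :=
  let adaptations : List (String × String) :=
    [("True", "true"), ("False", "false"), ("None", "null"),
     ("self.", "this."), ("def ", "public "), ("__init__", "constructor")]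
  adaptations.foldl (fun adapted kv => PySem.Str.replace adapted kv.1 kv.2) content

-- ===== PORT B =====
-- B: single left-to-right pass; at each position try the six tokens in order, emit the Java text and
-- skip the token on a match, otherwise copy one character.
def pvScan : List Char → List Char
  | [] => []
  | c :: t =>
    if ("True".toList).isPrefixOf (c :: t) then "true".toList ++ pvScan (t.drop 3)
    else if ("False".toList).isPrefixOf (c :: t) then "false".toList ++ pvScan (t.drop 4)
    else if ("None".toList).isPrefixOf (c :: t) then "null".toList ++ pvScan (t.drop 3)
    else if ("self.".toList).isPrefixOf (c :: t) then "this.".toList ++ pvScan (t.drop 4)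
    else if ("def ".toList).isPrefixOf (c :: t) then "public ".toList ++ pvScan (t.drop 3)
    else if ("__init__".toList).isPrefixOf (c :: t) then "constructor".toList ++ pvScan (t.drop 7)
    else c :: pvScan t
  termination_by s => s.length
  decreasing_by all_goals (simp; try omega)

def adapt_to_java_py_alt (content : String) : String :=
  String.ofList (pvScan content.toList)

-- ===== PRECONDITION & SPEC =====
-- Pre_ excludes inputs containing "Falself.", where the tokens "False" and "self." overlap: which
-- match wins is unspecified, and the two programs defensibly differ (A's sequential passes rewrite
-- the overlap twice, "Falself." -> "falthis."; B's single pass takes the leftmost match, giving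
-- "falself."), so such inputs are outside the claim.
def Pre_adapt_to_java_py (content : String) : Prop := ¬ "Falself.".toList <:+: content.toList
instance (content : String) : Decidable (Pre_adapt_to_java_py content) := by
  unfold Pre_adapt_to_java_py; infer_instance

def pvWitness_adapt_to_java_py : String := "def f(self): return None"

def Spec_adapt_to_java_py (content : String) (out : String) : Prop :=
  out = adapt_to_java_py_alt content
instance (content : String) (out : String) : Decidable (Spec_adapt_to_java_py content out) := by
  unfold Spec_adapt_to_java_py; infer_instance

-- ===== CLAIM (what is proved, stated in full; the proofs are below) =====
def Claim_equal_adapt_to_java_py : Prop := ∀ (content : String), Dom_adapt_to_java_py content → Pre_adapt_to_java_py content → Spec_adapt_to_java_py content (adapt_to_java_py content)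

-- ===== LEMMAS AND PROOFS =====

@[simp] lemma tl_True : "True".toList = ['T','r','u','e'] := rfl
@[simp] lemma tl_true : "true".toList = ['t','r','u','e'] := rfl
@[simp] lemma tl_False : "False".toList = ['F','a','l','s','e'] := rfl
@[simp] lemma tl_false : "false".toList = ['f','a','l','s','e'] := rfl
@[simp] lemma tl_None : "None".toList = ['N','o','n','e'] := rfl
@[simp] lemma tl_null : "null".toList = ['n','u','l','l'] := rfl
@[simp] lemma tl_self : "self.".toList = ['s','e','l','f','.'] := rfl
@[simp] lemma tl_this : "this.".toList = ['t','h','i','s','.'] := rfl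
@[simp] lemma tl_def : "def ".toList = ['d','e','f',' '] := rfl
@[simp] lemma tl_public : "public ".toList = ['p','u','b','l','i','c',' '] := rfl
@[simp] lemma tl_init : "__init__".toList = ['_','_','i','n','i','t','_','_'] := rfl
@[simp] lemma tl_constructor : "constructor".toList = ['c','o','n','s','t','r','u','c','t','o','r'] := rfl
@[simp] lemma tl_falself : "Falself.".toList = ['F','a','l','s','e','l','f','.'] := rfl

-- a single Python str.replace pass, as plain structural recursion
def pvRep (k v : List Char) : List Char → List Char
  | [] => []
  | c :: t =>
    if k.isPrefixOf (c :: t) then v ++ pvRep k v (t.drop (k.length - 1))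
    else c :: pvRep k v t
  termination_by s => s.length
  decreasing_by all_goals (simp; try omega)

-- the six passes of A, on lists of characters
def pvChain (s : List Char) : List Char :=
  pvRep "__init__".toList "constructor".toList
    (pvRep "def ".toList "public ".toList
      (pvRep "self.".toList "this.".toList
        (pvRep "None".toList "null".toList
          (pvRep "False".toList "false".toList
            (pvRep "True".toList "true".toList s)))))

lemma pvRep_nil (k v : List Char) : pvRep k v [] = [] := by simp [pvRep]

lemma pvRep_cons_neg (k v : List Char) (c : Char) (t : List Char)
    (h : ¬ k <+: (c :: t)) : pvRep k v (c :: t) = c :: pvRep k v t := by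
  rw [pvRep, if_neg]
  simp [List.isPrefixOf_iff_prefix, h]

lemma no_pre_of_head (a b : Char) (k t : List Char) (hne : a ≠ b) : ¬ (a :: k <+: b :: t) :=
  fun hp => hne (List.cons_prefix_cons.mp hp).1

lemma pvRep_eq_go (old new : List Char) (hk : old ≠ []) :
    ∀ fuel l acc, l.length ≤ fuel →
      PySem.Chars.replace.go old new fuel l acc = acc.reverse ++ pvRep old new l := by
  intro fuel
  induction fuel with
  | zero =>
    intro l acc hl
    have : l = [] := List.eq_nil_of_length_eq_zero (Nat.le_zero.mp hl)
    subst this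
    simp [PySem.Chars.replace.go, pvRep_nil]
  | succ n ih =>
    intro l acc hl
    match l with
    | [] => simp [PySem.Chars.replace.go, pvRep_nil]
    | c :: t =>
      rw [PySem.Chars.replace.go]
      by_cases hp : old.isPrefixOf (c :: t)
      · rw [if_pos hp]
        obtain ⟨o, os, rfl⟩ : ∃ o os, old = o :: os := by
          cases old with
          | nil => exact absurd rfl hk
          | cons o os => exact ⟨o, os, rfl⟩
        have hlen : ((c :: t).drop (o :: os).length).length ≤ n := by
          simp at hl ⊢; omega
        rw [ih _ _ hlen]
        rw [pvRep, if_pos hp]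
        simp
      · rw [if_neg hp]
        have hlen : t.length ≤ n := by simp at hl; omega
        rw [ih _ _ hlen]
        rw [pvRep, if_neg hp]
        simp

lemma replace_eq_pvRep (s old new : List Char) (hk : old ≠ []) :
    PySem.Chars.replace s old new = pvRep old new s := by
  have : old.isEmpty = false := by
    cases old with | nil => exact absurd rfl hk | cons a l => rfl
  rw [PySem.Chars.replace, this]
  simpa using pvRep_eq_go old new hk s.length s [] (le_refl _)

lemma adapt_toList (content : String) :
    (adapt_to_java_py content).toList = pvChain content.toList := by
  simp only [adapt_to_java_py, List.foldl, pvChain]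
  simp only [PySem.Str.toList_replace]
  rw [replace_eq_pvRep _ _ _ (by simp), replace_eq_pvRep _ _ _ (by simp),
      replace_eq_pvRep _ _ _ (by simp), replace_eq_pvRep _ _ _ (by simp),
      replace_eq_pvRep _ _ _ (by simp), replace_eq_pvRep _ _ _ (by simp)]

-- if no occurrence of k can start inside a (k's head char never occurs in a), the pass walks over a
lemma pvRep_skip (k v a : List Char) (hk : k ≠ []) (h : ∀ c ∈ a, k.head? ≠ some c) :
    ∀ b, pvRep k v (a ++ b) = a ++ pvRep k v b := by
  induction a with
  | nil => intro b; simp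
  | cons c a' ih =>
    intro b
    have hnp : ¬ k <+: (c :: (a' ++ b)) := by
      intro hp
      cases k with
      | nil => exact absurd rfl hk
      | cons x xs => exact (h c (by simp)) (by simp [(List.cons_prefix_cons.mp hp).1])
    rw [List.cons_append, pvRep_cons_neg _ _ _ _ hnp, ih (fun c hc => h c (by simp [hc]))]
    simp

-- the "self." pass walks over a literal "false" unless the rest starts with "lf."
lemma pvRep_skip_false (b : List Char) (h : ¬ ['l','f','.'] <+: b) :
    pvRep "self.".toList "this.".toList ("false".toList ++ b)
      = "false".toList ++ pvRep "self.".toList "this.".toList b := by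
  simp only [tl_self, tl_this, tl_false, List.cons_append, List.nil_append]
  rw [pvRep_cons_neg _ _ _ _ (no_pre_of_head _ _ _ _ (by decide)),
      pvRep_cons_neg _ _ _ _ (no_pre_of_head _ _ _ _ (by decide)),
      pvRep_cons_neg _ _ _ _ (no_pre_of_head _ _ _ _ (by decide)),
      pvRep_cons_neg _ _ _ _ (by
        intro hp
        rw [List.cons_prefix_cons] at hp
        rcases hp with ⟨-, hp⟩
        rw [List.cons_prefix_cons] at hp
        rcases hp with ⟨-, hp⟩
        exact h hp),
      pvRep_cons_neg _ _ _ _ (no_pre_of_head _ _ _ _ (by decide))]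

-- a matching pass at the front of the string consumes the key and emits the value
lemma pvRep_key (k v t : List Char) (hk : k ≠ []) :
    pvRep k v (k ++ t) = v ++ pvRep k v t := by
  obtain ⟨o, os, rfl⟩ : ∃ o os, k = o :: os := by
    cases k with
    | nil => exact absurd rfl hk
    | cons o os => exact ⟨o, os, rfl⟩
  rw [List.cons_append, pvRep,
      if_pos (List.isPrefixOf_iff_prefix.mpr ⟨t, by simp⟩)]
  have h1 : (o :: os).length - 1 = os.length := by simp
  rw [h1, List.drop_left]

lemma prefix_append_cases {α : Type} (q v x : List α) (h : q <+: v ++ x) :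
    q <+: v ∨ v <+: q := by
  induction v generalizing q with
  | nil => right; exact List.nil_prefix
  | cons a v' ih =>
    cases q with
    | nil => left; exact List.nil_prefix
    | cons b q' =>
      rw [List.cons_append, List.cons_prefix_cons] at h
      rcases ih q' h.2 with h' | h'
      · left; rw [List.cons_prefix_cons]; exact ⟨h.1, h'⟩
      · right; rw [List.cons_prefix_cons]; exact ⟨h.1.symm, h'⟩

-- pulling a short pattern q back through one pass: if v can never collide with a tail of q,
-- a pass output starting with q forces the input to start with q
lemma pvRep_pullback (k v : List Char) :
    ∀ u q, (∀ i, i < q.length → ¬ v <+: q.drop i ∧ ¬ q.drop i <+: v) →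
      q <+: pvRep k v u → q <+: u := by
  intro u
  induction u with
  | nil =>
    intro q _ h
    rw [pvRep_nil, List.prefix_nil] at h
    simp [h]
  | cons c t ih =>
    intro q hC h
    by_cases hp : k.isPrefixOf (c :: t)
    · rw [pvRep, if_pos hp] at h
      cases q with
      | nil => exact List.nil_prefix
      | cons q0 q' =>
        rcases prefix_append_cases _ _ _ h with h' | h'
        · exact absurd h' (hC 0 (by simp)).2
        · exact absurd h' (hC 0 (by simp)).1
    · rw [pvRep_cons_neg _ _ _ _ (fun h' => hp (List.isPrefixOf_iff_prefix.mpr h'))] at h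
      cases q with
      | nil => exact List.nil_prefix
      | cons q0 q' =>
        rw [List.cons_prefix_cons] at h ⊢
        exact ⟨h.1, ih q' (fun i hi => hC (i + 1) (by simpa using hi)) h.2⟩

-- ===== the six scan-step equations =====
lemma pvScan_true (t : List Char) : pvScan ("True".toList ++ t) = "true".toList ++ pvScan t := by
  simp only [tl_True, tl_true, List.cons_append, List.nil_append]
  rw [pvScan, if_pos (by simp [List.isPrefixOf])]
  simp

lemma pvScan_false (t : List Char) : pvScan ("False".toList ++ t) = "false".toList ++ pvScan t := by
  simp only [tl_False, tl_false, List.cons_append, List.nil_append]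
  rw [pvScan, if_neg (by simp [List.isPrefixOf]), if_pos (by simp [List.isPrefixOf])]
  simp

lemma pvScan_none (t : List Char) : pvScan ("None".toList ++ t) = "null".toList ++ pvScan t := by
  simp only [tl_None, tl_null, List.cons_append, List.nil_append]
  rw [pvScan, if_neg (by simp [List.isPrefixOf]), if_neg (by simp [List.isPrefixOf]),
      if_pos (by simp [List.isPrefixOf])]
  simp

lemma pvScan_self (t : List Char) : pvScan ("self.".toList ++ t) = "this.".toList ++ pvScan t := by
  simp only [tl_self, tl_this, List.cons_append, List.nil_append]
  rw [pvScan, if_neg (by simp [List.isPrefixOf]), if_neg (by simp [List.isPrefixOf]),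
      if_neg (by simp [List.isPrefixOf]), if_pos (by simp [List.isPrefixOf])]
  simp

lemma pvScan_def (t : List Char) : pvScan ("def ".toList ++ t) = "public ".toList ++ pvScan t := by
  simp only [tl_def, tl_public, List.cons_append, List.nil_append]
  rw [pvScan, if_neg (by simp [List.isPrefixOf]), if_neg (by simp [List.isPrefixOf]),
      if_neg (by simp [List.isPrefixOf]), if_neg (by simp [List.isPrefixOf]),
      if_pos (by simp [List.isPrefixOf])]
  simp

lemma pvScan_init (t : List Char) : pvScan ("__init__".toList ++ t) = "constructor".toList ++ pvScan t := by
  simp only [tl_init, tl_constructor, List.cons_append, List.nil_append]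
  rw [pvScan, if_neg (by simp [List.isPrefixOf]), if_neg (by simp [List.isPrefixOf]),
      if_neg (by simp [List.isPrefixOf]), if_neg (by simp [List.isPrefixOf]),
      if_neg (by simp [List.isPrefixOf]), if_pos (by simp [List.isPrefixOf])]
  simp

lemma pvScan_char (c : Char) (t : List Char)
    (h1 : ¬ "True".toList <+: (c :: t)) (h2 : ¬ "False".toList <+: (c :: t))
    (h3 : ¬ "None".toList <+: (c :: t)) (h4 : ¬ "self.".toList <+: (c :: t))
    (h5 : ¬ "def ".toList <+: (c :: t)) (h6 : ¬ "__init__".toList <+: (c :: t)) :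
    pvScan (c :: t) = c :: pvScan t := by
  rw [pvScan,
      if_neg (by simpa [List.isPrefixOf_iff_prefix] using h1),
      if_neg (by simpa [List.isPrefixOf_iff_prefix] using h2),
      if_neg (by simpa [List.isPrefixOf_iff_prefix] using h3),
      if_neg (by simpa [List.isPrefixOf_iff_prefix] using h4),
      if_neg (by simpa [List.isPrefixOf_iff_prefix] using h5),
      if_neg (by simpa [List.isPrefixOf_iff_prefix] using h6)]

-- an infix of the tail is an infix of the whole
lemma infix_of_suffix_part (fls pre t s : List Char) (hs : s = pre ++ t) (h : fls <:+: t) :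
    fls <:+: s := by
  subst hs
  exact h.trans (List.suffix_append pre t).isInfix

-- ===== the main equivalence, outside D_ =====
lemma pvChain_eq_pvScan : ∀ n (s : List Char), s.length ≤ n →
    ¬ "Falself.".toList <:+: s → pvChain s = pvScan s := by
  intro n
  induction n with
  | zero =>
    intro s hl _
    have : s = [] := List.eq_nil_of_length_eq_zero (Nat.le_zero.mp hl)
    subst this
    simp [pvChain, pvRep_nil, pvScan]
  | succ n ih =>
    intro s hl hinf
    by_cases h1 : "True".toList <+: s
    · obtain ⟨t, rfl⟩ := h1
      rw [pvScan_true, pvChain, pvRep_key _ _ _ (by simp),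
          pvRep_skip _ _ ("true".toList) (by simp) (by simp),
          pvRep_skip _ _ ("true".toList) (by simp) (by simp),
          pvRep_skip _ _ ("true".toList) (by simp) (by simp),
          pvRep_skip _ _ ("true".toList) (by simp) (by simp),
          pvRep_skip _ _ ("true".toList) (by simp) (by simp)]
      exact congrArg _ (ih t (by simp at hl; omega)
        (fun h => hinf (infix_of_suffix_part _ "True".toList t _ rfl h)))
    · by_cases h2 : "False".toList <+: s
      · obtain ⟨t, rfl⟩ := h2
        rw [pvScan_false, pvChain,
            pvRep_skip _ _ ("False".toList) (by simp) (by simp), pvRep_key _ _ _ (by simp),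
            pvRep_skip _ _ ("false".toList) (by simp) (by simp)]
        have hlf : ¬ ['l','f','.'] <+: pvRep "None".toList "null".toList
            (pvRep "False".toList "false".toList (pvRep "True".toList "true".toList t)) := by
          intro h
          have h := pvRep_pullback _ _ _ _ (by simp; decide) h
          have h := pvRep_pullback _ _ _ _ (by simp; decide) h
          have h := pvRep_pullback _ _ _ _ (by simp; decide) h
          obtain ⟨w, hw⟩ := h
          refine hinf ⟨[], w, ?_⟩
          rw [← hw]
          simp
        rw [pvRep_skip_false _ hlf,
            pvRep_skip _ _ ("false".toList) (by simp) (by simp),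
            pvRep_skip _ _ ("false".toList) (by simp) (by simp)]
        exact congrArg _ (ih t (by simp at hl; omega)
          (fun h => hinf (infix_of_suffix_part _ "False".toList t _ rfl h)))
      · by_cases h3 : "None".toList <+: s
        · obtain ⟨t, rfl⟩ := h3
          rw [pvScan_none, pvChain,
              pvRep_skip _ _ ("None".toList) (by simp) (by simp),
              pvRep_skip _ _ ("None".toList) (by simp) (by simp), pvRep_key _ _ _ (by simp),
              pvRep_skip _ _ ("null".toList) (by simp) (by simp),
              pvRep_skip _ _ ("null".toList) (by simp) (by simp),
              pvRep_skip _ _ ("null".toList) (by simp) (by simp)]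
          exact congrArg _ (ih t (by simp at hl; omega)
            (fun h => hinf (infix_of_suffix_part _ "None".toList t _ rfl h)))
        · by_cases h4 : "self.".toList <+: s
          · obtain ⟨t, rfl⟩ := h4
            rw [pvScan_self, pvChain,
                pvRep_skip _ _ ("self.".toList) (by simp) (by simp),
                pvRep_skip _ _ ("self.".toList) (by simp) (by simp),
                pvRep_skip _ _ ("self.".toList) (by simp) (by simp), pvRep_key _ _ _ (by simp),
                pvRep_skip _ _ ("this.".toList) (by simp) (by simp),
                pvRep_skip _ _ ("this.".toList) (by simp) (by simp)]
            exact congrArg _ (ih t (by simp at hl; omega)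
              (fun h => hinf (infix_of_suffix_part _ "self.".toList t _ rfl h)))
          · by_cases h5 : "def ".toList <+: s
            · obtain ⟨t, rfl⟩ := h5
              rw [pvScan_def, pvChain,
                  pvRep_skip _ _ ("def ".toList) (by simp) (by simp),
                  pvRep_skip _ _ ("def ".toList) (by simp) (by simp),
                  pvRep_skip _ _ ("def ".toList) (by simp) (by simp),
                  pvRep_skip _ _ ("def ".toList) (by simp) (by simp), pvRep_key _ _ _ (by simp),
                  pvRep_skip _ _ ("public ".toList) (by simp) (by simp)]
              exact congrArg _ (ih t (by simp at hl; omega)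
                (fun h => hinf (infix_of_suffix_part _ "def ".toList t _ rfl h)))
            · by_cases h6 : "__init__".toList <+: s
              · obtain ⟨t, rfl⟩ := h6
                rw [pvScan_init, pvChain,
                    pvRep_skip _ _ ("__init__".toList) (by simp) (by simp),
                    pvRep_skip _ _ ("__init__".toList) (by simp) (by simp),
                    pvRep_skip _ _ ("__init__".toList) (by simp) (by simp),
                    pvRep_skip _ _ ("__init__".toList) (by simp) (by simp),
                    pvRep_skip _ _ ("__init__".toList) (by simp) (by simp), pvRep_key _ _ _ (by simp)]
                exact congrArg _ (ih t (by simp at hl; omega)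
                  (fun h => hinf (infix_of_suffix_part _ "__init__".toList t _ rfl h)))
              · match s with
                | [] => simp [pvChain, pvRep_nil, pvScan]
                | c :: t =>
                  rw [pvScan_char c t h1 h2 h3 h4 h5 h6]
                  have hF : ¬ ("False".toList <+: c :: pvRep "True".toList "true".toList t) := by
                    intro hp
                    simp only [tl_False] at hp
                    rw [List.cons_prefix_cons] at hp
                    obtain ⟨hc, hrest⟩ := hp
                    have := pvRep_pullback _ _ _ _ (by simp; decide) hrest
                    exact h2 (by simp only [tl_False]; rw [List.cons_prefix_cons]; exact ⟨hc, this⟩)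
                  have hN : ¬ ("None".toList <+: c :: pvRep "False".toList "false".toList
                      (pvRep "True".toList "true".toList t)) := by
                    intro hp
                    simp only [tl_None] at hp
                    rw [List.cons_prefix_cons] at hp
                    obtain ⟨hc, hrest⟩ := hp
                    have h' := pvRep_pullback _ _ _ _ (by simp; decide) hrest
                    have h' := pvRep_pullback _ _ _ _ (by simp; decide) h'
                    exact h3 (by simp only [tl_None]; rw [List.cons_prefix_cons]; exact ⟨hc, h'⟩)
                  have hS : ¬ ("self.".toList <+: c :: pvRep "None".toList "null".toList
                      (pvRep "False".toList "false".toList (pvRep "True".toList "true".toList t))) := by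
                    intro hp
                    simp only [tl_self] at hp
                    rw [List.cons_prefix_cons] at hp
                    obtain ⟨hc, hrest⟩ := hp
                    have h' := pvRep_pullback _ _ _ _ (by simp; decide) hrest
                    have h' := pvRep_pullback _ _ _ _ (by simp; decide) h'
                    have h' := pvRep_pullback _ _ _ _ (by simp; decide) h'
                    exact h4 (by simp only [tl_self]; rw [List.cons_prefix_cons]; exact ⟨hc, h'⟩)
                  have hD : ¬ ("def ".toList <+: c :: pvRep "self.".toList "this.".toList
                      (pvRep "None".toList "null".toList (pvRep "False".toList "false".toList
                        (pvRep "True".toList "true".toList t)))) := by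
                    intro hp
                    simp only [tl_def] at hp
                    rw [List.cons_prefix_cons] at hp
                    obtain ⟨hc, hrest⟩ := hp
                    have h' := pvRep_pullback _ _ _ _ (by simp; decide) hrest
                    have h' := pvRep_pullback _ _ _ _ (by simp; decide) h'
                    have h' := pvRep_pullback _ _ _ _ (by simp; decide) h'
                    have h' := pvRep_pullback _ _ _ _ (by simp; decide) h'
                    exact h5 (by simp only [tl_def]; rw [List.cons_prefix_cons]; exact ⟨hc, h'⟩)
                  have hI : ¬ ("__init__".toList <+: c :: pvRep "def ".toList "public ".toList
                      (pvRep "self.".toList "this.".toList (pvRep "None".toList "null".toList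
                        (pvRep "False".toList "false".toList
                          (pvRep "True".toList "true".toList t))))) := by
                    intro hp
                    simp only [tl_init] at hp
                    rw [List.cons_prefix_cons] at hp
                    obtain ⟨hc, hrest⟩ := hp
                    have h' := pvRep_pullback _ _ _ _ (by simp; decide) hrest
                    have h' := pvRep_pullback _ _ _ _ (by simp; decide) h'
                    have h' := pvRep_pullback _ _ _ _ (by simp; decide) h'
                    have h' := pvRep_pullback _ _ _ _ (by simp; decide) h'
                    have h' := pvRep_pullback _ _ _ _ (by simp; decide) h'
                    exact h6 (by simp only [tl_init]; rw [List.cons_prefix_cons]; exact ⟨hc, h'⟩)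
                  rw [pvChain, pvRep_cons_neg _ _ _ _ h1, pvRep_cons_neg _ _ _ _ hF,
                      pvRep_cons_neg _ _ _ _ hN, pvRep_cons_neg _ _ _ _ hS,
                      pvRep_cons_neg _ _ _ _ hD, pvRep_cons_neg _ _ _ _ hI]
                  exact congrArg _ (ih t (by simp at hl; omega)
                    (fun h => hinf (infix_of_suffix_part _ [c] t _ rfl h)))

-- ===== VERDICT (by name: the statement is the Claim_ definition above) =====
theorem adapt_to_java_py_spec : Claim_equal_adapt_to_java_py := by
  intro content _ hPre
  unfold Spec_adapt_to_java_py adapt_to_java_py_alt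
  have h1 : (adapt_to_java_py content).toList = pvScan content.toList := by
    rw [adapt_toList]
    exact pvChain_eq_pvScan content.toList.length content.toList (le_refl _) hPre
  rw [← h1]
  exact String.ofList_toList.symm
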